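-- pv_equiv track=rewrite | github.com/mssssss123/Multimodal-Research2023 | clueweb/src/alt_text_baseline/gen_image_text_pair.py | chunk_dict
-- ===== SOURCE A (Python) =====
-- def chunk_dict(input_dict, chunk_size):
--     keys = list(input_dict.keys())
--     num_chunks = len(keys) // chunk_size + (1 if len(keys) % chunk_size != 0 else 0)
--
--     chunked_dicts = []
--     for i in range(num_chunks):
--         start_idx = i * chunk_size
--         end_idx = (i + 1) * chunk_size
--         chunk_keys = keys[start_idx:end_idx]
--         chunk = {key: input_dict[key] for key in chunk_keys}
--         chunked_dicts.append(chunk)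
--
--     return chunked_dicts
-- ===== SOURCE B (Python) =====
-- def chunk_dict(input_dict, chunk_size):
--     chunks = []
--     for i, (key, value) in enumerate(input_dict.items()):
--         if i % chunk_size == 0:
--             chunks.append({})
--         chunks[-1][key] = value
--     return chunks
-- ===== Notes on version B (the rewrite author's own statement) =====
-- stated objective: simpler
-- what changed: B replaces A's ceil-division chunk count, key-list slicing and per-key dict lookups by one pass over the items with an accumulator: a new chunk dict is appended whenever the element index is a multiple of chunk_size and each pair is inserted into the last chunk.
-- outside the precondition, e.g. on chunk_dict({'a': '1'}, -2): A returns [], B returns [{'a': '1'}]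
import Mathlib
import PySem

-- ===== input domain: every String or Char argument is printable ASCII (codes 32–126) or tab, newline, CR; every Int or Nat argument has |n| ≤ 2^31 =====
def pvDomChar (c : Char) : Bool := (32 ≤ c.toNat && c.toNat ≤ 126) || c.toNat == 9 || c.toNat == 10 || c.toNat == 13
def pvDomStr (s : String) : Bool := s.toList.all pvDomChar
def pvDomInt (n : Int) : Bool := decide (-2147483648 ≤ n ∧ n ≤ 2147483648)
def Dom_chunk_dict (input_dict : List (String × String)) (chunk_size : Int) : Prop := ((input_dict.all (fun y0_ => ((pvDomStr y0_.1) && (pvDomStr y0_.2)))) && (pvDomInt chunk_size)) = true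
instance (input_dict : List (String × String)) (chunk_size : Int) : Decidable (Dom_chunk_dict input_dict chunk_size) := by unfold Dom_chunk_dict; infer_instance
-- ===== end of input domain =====

-- B builds the chunks in one pass over the items (new chunk when the index is a multiple of chunk_size) instead of A's ceil-division chunk count, key-list slices and per-key dict lookups; equal on Pre_ (chunk_size ≥ 1, distinct keys).


-- ===== PORT A =====
def chunk_dict (input_dict : List (String × String)) (chunk_size : Int) : List (List (String × String)) :=
  let keys := input_dict.map Prod.fst
  let num_chunks : Int :=
    PySem.Int.floordiv (PySem.List.len keys) chunk_size +
      (if PySem.Int.mod (PySem.List.len keys) chunk_size ≠ 0 then 1 else 0)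
  (PySem.List.pyRange 0 num_chunks 1).foldl
    (fun chunked_dicts i =>
      let start_idx := i * chunk_size
      let end_idx := (i + 1) * chunk_size
      let chunk_keys := PySem.List.slice keys (some start_idx) (some end_idx)
      let chunk := (chunk_keys.foldl
        (fun (c : PySem.Dict String String) key =>
          c.insert key (((PySem.Dict.mk input_dict).get? key).getD "")) PySem.Dict.empty).items
      chunked_dicts ++ [chunk]) []

-- ===== PORT B =====
-- chunks[-1][key] = value: replace the last chunk by its updated copy.  Python raises
-- IndexError on an empty list there; that point is unreachable whenever B returns
-- (index 0 always opens a chunk), so the [] branch is an arbitrary total-function filler.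
def pvSetLast : List (PySem.Dict String String) → String → String → List (PySem.Dict String String)
  | [], _, _ => []
  | [d], k, v => [d.insert k v]
  | d :: d' :: rest, k, v => d :: pvSetLast (d' :: rest) k v

def chunk_dict_alt (input_dict : List (String × String)) (chunk_size : Int) : List (List (String × String)) :=
  ((PySem.List.enumerate input_dict 0).foldl
    (fun (chunks : List (PySem.Dict String String)) p =>
      let chunks := if PySem.Int.mod p.1 chunk_size = 0 then chunks ++ [PySem.Dict.empty] else chunks
      pvSetLast chunks p.2.1 p.2.2) []).map PySem.Dict.items

-- ===== PRECONDITION & SPEC =====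
-- Pre_ excludes chunk_size = 0 (A raises ZeroDivisionError there, even on an empty dict),
-- negative chunk_size (a corner no caller specifies: A's empty result and B's |chunk_size|-grouping
-- are equally arbitrary), and association lists with duplicate keys (they do not represent a
-- Python dict, which collapses duplicates before either function is called).
def Pre_chunk_dict (input_dict : List (String × String)) (chunk_size : Int) : Prop :=
  1 ≤ chunk_size ∧ (input_dict.map Prod.fst).Nodup
instance (input_dict : List (String × String)) (chunk_size : Int) : Decidable (Pre_chunk_dict input_dict chunk_size) := by unfold Pre_chunk_dict; infer_instance

def pvWitness_chunk_dict : (List (String × String)) × Int := ([("a", "1"), ("b", "2"), ("c", "3")], 2)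

def Spec_chunk_dict (input_dict : List (String × String)) (chunk_size : Int) (out : List (List (String × String))) : Prop := out = chunk_dict_alt input_dict chunk_size
instance (input_dict : List (String × String)) (chunk_size : Int) (out : List (List (String × String))) : Decidable (Spec_chunk_dict input_dict chunk_size out) := by unfold Spec_chunk_dict; infer_instance

-- ===== CLAIM (what is proved, stated in full; the proofs are below) =====
def Claim_equal_chunk_dict : Prop := ∀ (input_dict : List (String × String)) (chunk_size : Int), Dom_chunk_dict input_dict chunk_size → Pre_chunk_dict input_dict chunk_size → Spec_chunk_dict input_dict chunk_size (chunk_dict input_dict chunk_size)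

-- ===== LEMMAS AND PROOFS =====

-- The common normal form both ports are reduced to: consecutive slices of length c.
def listChunks (c : Nat) : List (String × String) → List (List (String × String))
  | xs =>
    if h : c = 0 ∨ xs = [] then [] else
      xs.take c :: listChunks c (xs.drop c)
  termination_by xs => xs.length
  decreasing_by
    have hxs : xs ≠ [] := fun hh => h (Or.inr hh)
    have hc0 : 0 < c := Nat.pos_of_ne_zero (fun hh => h (Or.inl hh))
    have hl : 0 < xs.length := List.length_pos_of_ne_nil hxs
    calc (xs.drop c).length = xs.length - c := by simp
      _ < xs.length := Nat.sub_lt hl hc0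

-- A's chunk-building loop: folding lookups of a sublist's keys into an empty dict reconstructs the sublist.
theorem chunkA_items (xs sub : List (String × String)) (hnd : (xs.map Prod.fst).Nodup)
    (hsub : sub.Sublist xs) :
    ((sub.map Prod.fst).foldl (fun (c : PySem.Dict String String) key =>
        c.insert key (((PySem.Dict.mk xs).get? key).getD "")) PySem.Dict.empty).items = sub := by
  rw [List.foldl_map]
  rw [PySem.Dict.items_foldl_insert_fresh sub Prod.fst
      (fun p => ((PySem.Dict.mk xs).get? p.1).getD "") PySem.Dict.empty
      (fun p _ => PySem.Dict.contains_empty _) ((hsub.map Prod.fst).nodup hnd)]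
  have h : ∀ p ∈ sub, (Prod.fst p, ((PySem.Dict.mk xs).get? p.1).getD "") = p := by
    intro p hp
    have hget : (PySem.Dict.mk xs).get? p.1 = some p.2 := by
      exact PySem.Dict.get?_of_mem_items _ (show (p.1, p.2) ∈ xs from by simpa using hsub.mem hp) hnd
    simp [hget]
  simp only [show (PySem.Dict.empty : PySem.Dict String String).items = [] from rfl, List.nil_append]
  exact (List.map_congr_left h).trans (List.map_id _)

-- B's chunk-building loop: folding a sublist's pairs into an empty dict reproduces the sublist.
theorem chunkB_items (xs sub : List (String × String)) (hnd : (xs.map Prod.fst).Nodup)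
    (hsub : sub.Sublist xs) :
    ((sub.foldl (fun (d : PySem.Dict String String) p => d.insert p.1 p.2) PySem.Dict.empty)).items = sub := by
  rw [PySem.Dict.items_foldl_insert_fresh sub Prod.fst Prod.snd PySem.Dict.empty
      (fun p _ => PySem.Dict.contains_empty _) ((hsub.map Prod.fst).nodup hnd)]
  simp only [show (PySem.Dict.empty : PySem.Dict String String).items = [] from rfl, List.nil_append]
  simp

theorem ceil_div_eq (n c : Nat) (hc : 0 < c) :
    n / c + (if n % c ≠ 0 then 1 else 0) = (n + c - 1) / c := by
  rcases Nat.eq_zero_or_pos n with h0 | hn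
  · subst h0; simp [Nat.div_eq_of_lt, hc]
  · have hqr := Nat.div_add_mod n c
    set q := n / c with hq
    set r := n % c with hr
    have hrlt : r < c := Nat.mod_lt _ hc
    have : (n + c - 1) / c = (c * q + (r + c - 1)) / c := by
      congr 1; omega
    rw [this, Nat.mul_add_div hc]
    by_cases hr0 : r = 0
    · simp [hr0, Nat.div_eq_of_lt, Nat.sub_lt hc]
    · have h1 : (r + c - 1) / c = 1 :=
        Nat.div_eq_of_lt_le (by omega) (by omega)
      simp [hr0, h1]

-- The slice-map form equals listChunks.
theorem slices_eq_listChunks (c : Nat) (hc : 0 < c) :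
    ∀ (n : Nat) (xs : List (String × String)), xs.length ≤ n →
    (List.range ((xs.length + c - 1) / c)).map (fun k => ((xs.drop (k * c)).take c)) = listChunks c xs := by
  intro n
  induction n with
  | zero =>
    intro xs hx
    have hxs : xs = [] := List.eq_nil_of_length_eq_zero (Nat.le_zero.mp hx)
    subst hxs
    rw [listChunks.eq_def]
    simp
    omega
  | succ n ih =>
    intro xs hx
    rcases eq_or_ne xs [] with rfl | hxs
    · rw [listChunks.eq_def]
      simp
      omega
    · have hlpos : 0 < xs.length := List.length_pos_of_ne_nil hxs
      rw [listChunks.eq_def, dif_neg (by simp [hxs]; omega)]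
      have hdl : (xs.drop c).length = xs.length - c := by simp
      have hceil : (xs.length + c - 1) / c = ((xs.drop c).length + c - 1) / c + 1 := by
        rw [hdl]
        rcases Nat.lt_or_ge c xs.length with hlt | hle
        swap
        · have h1 : (xs.length + c - 1) / c = 1 := Nat.div_eq_of_lt_le (by omega) (by omega)
          have h0 : xs.length - c = 0 := by omega
          rw [h1, h0, Nat.div_eq_of_lt (by omega)]
        · have he : xs.length + c - 1 = (xs.length - c + c - 1) + c := by omega
          rw [he, Nat.add_div_right _ hc]
      rw [hceil, List.range_succ_eq_map]
      simp only [List.map_cons, List.map_map, Nat.zero_mul, List.drop_zero]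
      congr 1
      rw [← ih (xs.drop c) (by rw [hdl]; omega)]
      apply List.map_congr_left
      intro k _
      simp only [Function.comp_apply, List.drop_drop]
      rw [Nat.succ_mul]
      ring

-- A equals listChunks for a positive chunk size and distinct keys.
theorem A_eq_listChunks (xs : List (String × String)) (c : Nat) (hc : 0 < c)
    (hnd : (xs.map Prod.fst).Nodup) :
    chunk_dict xs (c : Int) = listChunks c xs := by
  unfold chunk_dict
  simp only [PySem.List.len_eq, List.length_map]
  rw [PySem.Int.floordiv_natCast, PySem.Int.mod_natCast]
  rw [show ((xs.length / c : Nat) : Int) + (if ((xs.length % c : Nat) : Int) ≠ 0 then 1 else 0)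
        = ((xs.length / c + (if xs.length % c ≠ 0 then 1 else 0) : Nat) : Int) by
      by_cases h : xs.length % c = 0
      · simp [h]
      · simp [h, Int.natCast_dvd_natCast, Nat.dvd_iff_mod_eq_zero]]
  rw [ceil_div_eq xs.length c hc]
  rw [PySem.List.foldl_append_singleton_eq_map]
  rw [PySem.List.pyRange_one]
  simp only [List.map_map, List.nil_append, Int.sub_zero, Int.toNat_natCast]
  rw [← slices_eq_listChunks c hc xs.length xs le_rfl]
  apply List.map_congr_left
  intro k _
  simp only [Function.comp_apply]
  have hstart : (0 + (k : Int)) * (c : Int) = ((k * c : Nat) : Int) := by push_cast; ring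
  have hend : (0 + (k : Int) + 1) * (c : Int) = ((k * c : Nat) : Int) + ((c : Nat) : Int) := by
    push_cast; ring
  rw [hstart, hend, PySem.List.slice_natCast_add]
  have hsub : ((xs.map Prod.fst).drop (k * c)).take c
      = ((xs.drop (k * c)).take c).map Prod.fst := by
    rw [List.map_take, List.map_drop]
  rw [hsub]
  exact chunkA_items xs _ hnd ((List.take_sublist _ _).trans (List.drop_sublist _ _))

theorem pvSetLast_append (acc : List (PySem.Dict String String)) (d : PySem.Dict String String)
    (k v : String) : pvSetLast (acc ++ [d]) k v = acc ++ [d.insert k v] := by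
  induction acc with
  | nil => rfl
  | cons a acc ih =>
    cases acc with
    | nil => rfl
    | cons b acc => simpa [pvSetLast] using ih

-- B's fill step over a block of indices none of which is a multiple of c.
theorem B_fill (c : Nat) (l : List (String × String)) :
    ∀ (s : Int) (acc : List (PySem.Dict String String)) (d : PySem.Dict String String),
      (∀ j : Nat, j < l.length → ¬ ((c : Int) ∣ (s + (j : Int)))) →
      (PySem.List.enumerate l s).foldl
        (fun (chunks : List (PySem.Dict String String)) p =>
          let chunks := if PySem.Int.mod p.1 (c : Int) = 0 then chunks ++ [PySem.Dict.empty] else chunks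
          pvSetLast chunks p.2.1 p.2.2) (acc ++ [d])
      = acc ++ [l.foldl (fun (d : PySem.Dict String String) p => d.insert p.1 p.2) d] := by
  induction l with
  | nil => intro s acc d _; simp [PySem.List.enumerate_nil]
  | cons x l ih =>
    intro s acc d h
    rw [PySem.List.enumerate_cons, List.foldl_cons]
    have hmod : ¬ (PySem.Int.mod s (c : Int) = 0) := by
      rw [PySem.Int.mod_eq_zero_iff_dvd]
      simpa using h 0 (by simp)
    simp only [hmod, if_false, pvSetLast_append]
    rw [ih (s + 1) acc (d.insert x.1 x.2) (fun j hj => by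
      have := h (j + 1) (by simpa using Nat.succ_lt_succ hj)
      intro hdvd; apply this
      have : s + 1 + (j : Int) = s + ((j + 1 : Nat) : Int) := by push_cast; ring
      rwa [this] at hdvd)]
    rfl

-- B's main loop invariant: starting at an index that is a multiple of c with a list of
-- closed chunks, the fold appends exactly the c-slices of the remaining items.
theorem B_main (c : Nat) (hc : 0 < c) :
    ∀ (n : Nat) (xs : List (String × String)), xs.length ≤ n → (xs.map Prod.fst).Nodup →
    ∀ (q : Nat) (acc : List (PySem.Dict String String)),
      ((PySem.List.enumerate xs ((q * c : Nat) : Int)).foldl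
        (fun (chunks : List (PySem.Dict String String)) p =>
          let chunks := if PySem.Int.mod p.1 (c : Int) = 0 then chunks ++ [PySem.Dict.empty] else chunks
          pvSetLast chunks p.2.1 p.2.2) acc).map PySem.Dict.items
      = acc.map PySem.Dict.items ++ listChunks c xs := by
  obtain ⟨c', rfl⟩ : ∃ c'' : Nat, c = c'' + 1 := ⟨c - 1, by omega⟩
  intro n
  induction n with
  | zero =>
    intro xs hx _ q acc
    have hxs : xs = [] := List.eq_nil_of_length_eq_zero (Nat.le_zero.mp hx)
    subst hxs
    rw [listChunks.eq_def]
    simp [PySem.List.enumerate_nil]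
  | succ n ih =>
    intro xs hx hnd q acc
    rcases eq_or_ne xs [] with rfl | hxs
    · rw [listChunks.eq_def]
      simp [PySem.List.enumerate_nil]
    · obtain ⟨y, rest, rfl⟩ : ∃ y rest, xs = y :: rest := by
        cases xs with
        | nil => exact absurd rfl hxs
        | cons y rest => exact ⟨y, rest, rfl⟩
      rw [PySem.List.enumerate_cons, List.foldl_cons]
      have hmod : PySem.Int.mod ((q * (c' + 1) : Nat) : Int) ((c' + 1 : Nat) : Int) = 0 := by
        rw [PySem.Int.mod_eq_zero_iff_dvd]
        exact ⟨(q : Int), by push_cast; ring⟩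
      simp only [hmod, if_true, pvSetLast_append]
      have hsplit : PySem.List.enumerate rest (((q * (c' + 1) : Nat) : Int) + 1)
          = PySem.List.enumerate (rest.take c') (((q * (c' + 1) : Nat) : Int) + 1)
            ++ PySem.List.enumerate (rest.drop c')
                 ((((q * (c' + 1) : Nat) : Int) + 1) + ((rest.take c').length : Int)) := by
        conv_lhs => rw [← List.take_append_drop c' rest]
        rw [PySem.List.enumerate_append]
      rw [hsplit, List.foldl_append]
      rw [B_fill (c' + 1) (rest.take c') _ acc (PySem.Dict.empty.insert y.1 y.2) (fun j hj => by
        intro hdvd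
        have hj' : j < c' := lt_of_lt_of_le hj (by simpa using List.length_take_le c' rest)
        have h1 : ((q * (c' + 1) : Nat) : Int) + 1 + (j : Int) = (q : Int) * ((c' + 1 : Nat) : Int) + ((j + 1 : Nat) : Int) := by
          push_cast; ring
        rw [h1] at hdvd
        have h2 : ((c' + 1 : Nat) : Int) ∣ ((j + 1 : Nat) : Int) :=
          (Int.dvd_add_right ⟨(q : Int), by ring⟩).mp hdvd
        have h3 : (c' + 1) ∣ (j + 1) := Int.natCast_dvd_natCast.mp h2
        have := Nat.le_of_dvd (by omega) h3
        omega)]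
      have hD : ((y :: rest.take c').foldl
          (fun (d : PySem.Dict String String) p => d.insert p.1 p.2) PySem.Dict.empty).items
          = y :: rest.take c' := by
        apply chunkB_items (y :: rest)
        · exact hnd
        · exact (List.Sublist.cons₂ y (List.take_sublist _ _))
      rcases Nat.lt_or_ge c' rest.length with hlt | hle
      swap
      · -- the remaining items fit in this (last) chunk
        have hdrop : rest.drop c' = [] := List.drop_eq_nil_of_le hle
        rw [hdrop]
        simp only [PySem.List.enumerate_nil, List.foldl_nil, List.map_append, List.map_cons,
          List.map_nil]
        rw [listChunks.eq_def, dif_neg (by simp)]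
        have hdrop2 : (y :: rest).drop (c' + 1) = rest.drop c' := rfl
        rw [hdrop2, hdrop, listChunks.eq_def]
        simp only [List.foldl_cons] at hD
        rw [hD]
        simp [List.take_of_length_le hle]
      · -- the chunk is full: continue at the next multiple of c
        have hlen : (rest.take c').length = c' := List.length_take_of_le (by omega)
        have hidx : ((q * (c' + 1) : Nat) : Int) + 1 + ((rest.take c').length : Int)
            = (((q + 1) * (c' + 1) : Nat) : Int) := by
          rw [hlen]; push_cast; ring
        rw [hidx]
        rw [ih (rest.drop c') (by simp only [List.length_drop]; simp at hx; omega)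
          (by
            have hsub : ((rest.drop c').map Prod.fst).Sublist ((y :: rest).map Prod.fst) :=
              List.Sublist.map Prod.fst ((List.drop_sublist _ _).trans (List.sublist_cons_self _ _))
            exact hsub.nodup hnd) (q + 1) _]
        have hLC : listChunks (c' + 1) (y :: rest)
            = (y :: rest.take c') :: listChunks (c' + 1) (rest.drop c') := by
          rw [listChunks.eq_def, dif_neg (by simp)]
          simp
        rw [hLC]
        simp only [List.foldl_cons] at hD
        simp [hD]

theorem B_eq_listChunks (xs : List (String × String)) (c : Nat) (hc : 0 < c)
    (hnd : (xs.map Prod.fst).Nodup) :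
    chunk_dict_alt xs (c : Int) = listChunks c xs := by
  unfold chunk_dict_alt
  have h := B_main c hc xs.length xs le_rfl hnd 0 []
  simpa using h

-- ===== VERDICT (by name: the statement is the Claim_ definition above) =====
theorem chunk_dict_spec : Claim_equal_chunk_dict := by
  intro xs cs _hdom hpre
  obtain ⟨hcs, hnd⟩ := hpre
  obtain ⟨c, rfl⟩ : ∃ c : Nat, cs = (c : Int) := ⟨cs.toNat, (Int.toNat_of_nonneg (by omega)).symm⟩
  have hc : 0 < c := by exact_mod_cast lt_of_lt_of_le zero_lt_one hcs
  unfold Spec_chunk_dict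
  rw [A_eq_listChunks xs c hc hnd, B_eq_listChunks xs c hc hnd]
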